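-- pv_equiv track=rewrite | github.com/fanyin3639/LID_for_Truthfulness | main.py | clean_generated_text
-- ===== SOURCE A (Python) =====
-- def clean_generated_text(generated_texts):
--     stop = ['--', '</s>', '<unk>', '\n', ';', '#', "'Question'"]
--     prediction = []
--     for idx, generated_text in enumerate(generated_texts):
--         stop_index = len(generated_text)
--         for i, c in enumerate(generated_text):
--             if c.strip(' ') in stop:
--                 stop_index = i
--                 break
--         prediction.append(generated_text[:stop_index])
--     return prediction
-- ===== SOURCE B (Python) =====
-- def clean_generated_text(generated_texts):
--     # Idiomatic rewrite: only '\n', ';', '#' can ever match (multi-char stop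
--     # entries never equal a single char; ' ' strips to '' which is not a stop),
--     # so cut each text at the earliest find() of those three characters.
--     prediction = []
--     for text in generated_texts:
--         cuts = [p for p in (text.find(ch) for ch in "\n;#") if p != -1]
--         prediction.append(text[:min(cuts, default=len(text))])
--     return prediction
-- ===== Notes on version B (the rewrite author's own statement) =====
-- stated objective: idiomatic
-- what changed: Replaced the explicit char-by-char scan with membership tests against the full stop list (whose multi-char entries are dead code for single characters, and whose space case strips to '') by taking the minimum of text.find() positions of the three single stop characters and slicing once.
import Mathlib
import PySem

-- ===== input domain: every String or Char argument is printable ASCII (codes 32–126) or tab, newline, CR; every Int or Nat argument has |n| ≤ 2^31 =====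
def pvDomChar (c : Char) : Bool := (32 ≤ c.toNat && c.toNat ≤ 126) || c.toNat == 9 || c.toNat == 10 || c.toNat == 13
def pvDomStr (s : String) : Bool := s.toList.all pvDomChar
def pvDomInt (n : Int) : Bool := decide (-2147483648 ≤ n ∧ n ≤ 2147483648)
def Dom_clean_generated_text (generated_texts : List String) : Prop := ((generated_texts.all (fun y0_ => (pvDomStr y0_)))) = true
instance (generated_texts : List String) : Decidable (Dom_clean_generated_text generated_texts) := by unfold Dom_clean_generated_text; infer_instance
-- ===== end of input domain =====

-- B replaces A's char-by-char scan against the full stop list by the minimum of the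
-- find() positions of the three single stop characters; objective: idiomatic.


-- ===== PORT A =====
-- stop = ['--', '</s>', '<unk>', '\n', ';', '#', "'Question'"]
def pvStop : List (List Char) :=
  [['-','-'], ['<','/','s','>'], ['<','u','n','k','>'], ['\n'], [';'], ['#'],
   ['\'','Q','u','e','s','t','i','o','n','\'']]

-- the inner 'for i, c in enumerate(generated_text): if c.strip(' ') in stop: stop_index = i; break'
def pvFindStop : List Char → Nat → Option Nat
  | [], _ => none
  | c :: cs, i =>
    if pvStop.contains (PySem.Chars.stripChars [c] [' ']) then some i else pvFindStop cs (i + 1)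

def clean_generated_text (generated_texts : List String) : List String :=
  generated_texts.foldl (fun prediction generated_text =>
    let stop_index : Nat :=
      match pvFindStop generated_text.toList 0 with
      | some i => i
      | none => generated_text.toList.length
    prediction ++ [PySem.Str.slice generated_text none (some (Int.ofNat stop_index))]) []

-- ===== PORT B =====
def clean_generated_text_alt (generated_texts : List String) : List String :=
  generated_texts.foldl (fun prediction text =>
    let cuts := ((['\n', ';', '#']).map (fun ch => PySem.Chars.find text.toList [ch])).filter
      (fun p => p ≠ -1)
    prediction ++ [PySem.Str.slice text none
      (some (PySem.List.minD cuts (fun x => x) (PySem.Str.len text)))]) []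

-- ===== PRECONDITION & SPEC =====
def Spec_clean_generated_text (generated_texts : List String) (out : List String) : Prop := out = clean_generated_text_alt generated_texts
instance (generated_texts : List String) (out : List String) : Decidable (Spec_clean_generated_text generated_texts out) := by unfold Spec_clean_generated_text; infer_instance

-- ===== CLAIM (what is proved, stated in full; the proofs are below) =====
def Claim_equal_clean_generated_text : Prop := ∀ (generated_texts : List String), Dom_clean_generated_text generated_texts → Spec_clean_generated_text generated_texts (clean_generated_text generated_texts)

-- ===== LEMMAS AND PROOFS =====

-- the three single characters that can actually match after c.strip(' ')
def pvStops : List Char := ['\n', ';', '#']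

-- A's per-character membership test, evaluated on one character
theorem pv_head_test (c : Char) :
    pvStop.contains (PySem.Chars.stripChars [c] [' ']) = pvStops.contains c := by
  have h : PySem.Chars.stripChars [c] [' '] = if c = ' ' then [] else [c] := by
    by_cases h : c = ' ' <;> simp [PySem.Chars.stripChars, h]
  rw [h]
  by_cases h1 : c = ' '
  · simp [h1, pvStop, pvStops]
  · simp [h1, pvStop, pvStops, List.contains_eq_mem]

-- text.find(ch) for a single character ch is the first index of ch (or -1)
theorem pv_find_single (s : List Char) (ch : Char) :
    PySem.Chars.find s [ch] = if ch ∈ s then (s.findIdx (· == ch) : Int) else -1 := by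
  by_cases h : ch ∈ s
  · have hin : [ch] <:+: s := (List.singleton_infix_iff ch s).mpr h
    have h0 : 0 ≤ PySem.Chars.find s [ch] := (PySem.Chars.find_nonneg_iff s [ch]).mpr hin
    obtain ⟨hpre, hmin⟩ := PySem.Chars.find_spec h0
    set n := (PySem.Chars.find s [ch]).toNat with hn
    set k := s.findIdx (· == ch) with hk
    have hklt : k < s.length := List.findIdx_lt_length_of_exists ⟨ch, h, by simp⟩
    have hsk : s[k] = ch := by
      have := List.findIdx_getElem (w := hklt)
      simpa using this
    have hnk : ¬ k < n := by
      intro hlt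
      apply hmin k hlt
      rw [List.drop_eq_getElem_cons hklt, hsk]
      exact ⟨_, rfl⟩
    have hnlt : n < s.length := by
      obtain ⟨t, ht⟩ := hpre
      have : (s.drop n).length > 0 := by rw [← ht]; simp
      omega
    have hsn : s[n] = ch := by
      obtain ⟨t, ht⟩ := hpre
      rw [List.drop_eq_getElem_cons hnlt] at ht
      exact (List.cons.injEq _ _ _ _ ▸ ht.symm).1.symm ▸ rfl
    have hkn : ¬ n < k := by
      intro hlt
      have := List.not_of_lt_findIdx hlt
      simp only [beq_eq_false_iff_ne] at this
      exact this hsn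
    have heq : n = k := by omega
    simp [h, ← heq, hn]
    omega
  · rw [if_neg h, PySem.Chars.find_eq_neg_one_iff]
    simp [h, List.singleton_infix_iff]

-- A's inner loop is findIdx over the effective stop characters
theorem pvFindStop_eq (s : List Char) :
    ∀ i : Nat, pvFindStop s i =
      if s.findIdx (fun c => pvStops.contains c) < s.length
      then some (s.findIdx (fun c => pvStops.contains c) + i) else none := by
  induction s with
  | nil => intro i; simp [pvFindStop]
  | cons c cs ih =>
    intro i
    rw [pvFindStop, pv_head_test]
    by_cases hc : c ∈ pvStops
    · rw [if_pos (by simp [List.contains_eq_mem, hc])]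
      have hf : (c :: cs).findIdx (fun c => pvStops.contains c) = 0 := by
        simp [List.findIdx_cons, List.contains_eq_mem, hc]
      rw [hf]
      simp
    · rw [if_neg (by simp [List.contains_eq_mem, hc]), ih (i + 1)]
      have hf : (c :: cs).findIdx (fun c => pvStops.contains c)
          = cs.findIdx (fun c => pvStops.contains c) + 1 := by
        simp [List.findIdx_cons, List.contains_eq_mem, hc]
      rw [hf]
      simp only [List.length_cons]
      by_cases hlt : cs.findIdx (fun c => pvStops.contains c) < cs.length
      · rw [if_pos hlt, if_pos (by omega)]
        congr 1
        omega
      · rw [if_neg hlt, if_neg (by omega)]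

-- A's stop_index equals findIdx (which is the length when no stop char occurs)
theorem pv_cutA_eq (s : List Char) :
    (match pvFindStop s 0 with
     | some i => i
     | none => s.length) = s.findIdx (fun c => pvStops.contains c) := by
  rw [pvFindStop_eq s 0]
  by_cases h : s.findIdx (fun c => pvStops.contains c) < s.length
  · rw [if_pos h]
    show s.findIdx (fun c => pvStops.contains c) + 0 = _
    omega
  · rw [if_neg h]
    show s.length = _
    have := List.findIdx_le_length (p := fun c => pvStops.contains c) (xs := s)
    omega

-- B's min-of-finds equals the same findIdx
theorem pv_cutB_eq (s : List Char) :
    PySem.List.minD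
      (((['\n', ';', '#']).map (fun ch => PySem.Chars.find s [ch])).filter (fun p => p ≠ -1))
      (fun x => x) (s.length : Int)
    = (s.findIdx (fun c => pvStops.contains c) : Int) := by
  set N := s.findIdx (fun c => pvStops.contains c) with hN
  set cuts := ((['\n', ';', '#']).map (fun ch => PySem.Chars.find s [ch])).filter (fun p => p ≠ -1)
    with hcuts
  clear_value N cuts
  have hNle : N ≤ s.length := by rw [hN]; exact List.findIdx_le_length
  -- any position collected by B is at least N
  have hlow : ∀ x ∈ cuts, (N : Int) ≤ x := by
    intro x hx
    rw [hcuts] at hx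
    simp only [List.mem_filter, List.mem_map] at hx
    obtain ⟨⟨ch, hch, hfind⟩, hne⟩ := hx
    simp only [decide_eq_true_eq] at hne
    have hchs : ch ∈ pvStops := by simpa [pvStops] using hch
    rw [pv_find_single] at hfind
    by_cases h : ch ∈ s
    · rw [if_pos h] at hfind
      set k := s.findIdx (· == ch) with hk
      have hklt : k < s.length := List.findIdx_lt_length_of_exists ⟨ch, h, by simp⟩
      have hsk : s[k] = ch := by
        have := List.findIdx_getElem (w := hklt)
        simpa using this
      have hNk : N ≤ k := by
        by_contra hcon
        have := List.not_of_lt_findIdx (p := fun c => pvStops.contains c)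
          (by omega : k < s.findIdx (fun c => pvStops.contains c))
        simp only [List.contains_eq_mem, decide_eq_false_iff_not] at this
        exact this (hsk.symm ▸ hchs)
      omega
    · rw [if_neg h] at hfind
      exact absurd hfind.symm hne
  by_cases hNlt : N < s.length
  · -- a stop char occurs; its own find is exactly N, so N ∈ cuts
    have hchN : s[N] ∈ pvStops := by
      have h2 := List.findIdx_getElem (p := fun c => pvStops.contains c) (xs := s)
        (w := by omega)
      simp only [← hN] at h2
      simp only [List.contains_eq_mem, decide_eq_true_eq] at h2
      exact h2
    have hmemN : s[N] ∈ s := List.getElem_mem hNlt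
    have hfix : s.findIdx (· == s[N]) = N := by
      set k := s.findIdx (· == s[N]'hNlt) with hk
      have hklt : k < s.length := List.findIdx_lt_length_of_exists ⟨s[N], hmemN, by simp⟩
      have hsk : s[k] = s[N]'hNlt := by
        have := List.findIdx_getElem (w := hklt)
        simpa using this
      have h1 : ¬ N < k := by
        intro hlt
        have := List.not_of_lt_findIdx (p := (· == s[N]'hNlt)) hlt
        simp only [beq_eq_false_iff_ne] at this
        exact this rfl
      have h2 : ¬ k < N := by
        intro hlt
        have := List.not_of_lt_findIdx (p := fun c => pvStops.contains c)
          (by omega : k < s.findIdx (fun c => pvStops.contains c))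
        simp only [List.contains_eq_mem, decide_eq_false_iff_not] at this
        exact this (hsk.symm ▸ hchN)
      omega
    have hNin : (N : Int) ∈ cuts := by
      rw [hcuts]
      simp only [List.mem_filter, List.mem_map]
      refine ⟨⟨s[N], by simpa [pvStops] using hchN, ?_⟩, by simp⟩
      rw [pv_find_single, if_pos hmemN, hfix]
    cases hm : PySem.List.min? cuts (fun x => x) with
    | none =>
      rw [PySem.List.min?_eq_none_iff] at hm
      rw [hm] at hNin
      simp at hNin
    | some m =>
      have h1 : (N : Int) ≤ m := hlow m (PySem.List.min?_mem hm)
      have h2 : m ≤ (N : Int) := PySem.List.min?_isMin hm _ hNin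
      simp [PySem.List.minD, hm]
      omega
  · -- no stop char occurs: every find is -1, cuts is empty, both sides are the length
    have hnos : ∀ ch ∈ pvStops, ch ∉ s := by
      intro ch hchs h
      set k := s.findIdx (· == ch) with hk
      have hklt : k < s.length := List.findIdx_lt_length_of_exists ⟨ch, h, by simp⟩
      have hsk : s[k] = ch := by
        have := List.findIdx_getElem (w := hklt)
        simpa using this
      have := List.not_of_lt_findIdx (p := fun c => pvStops.contains c)
        (by omega : k < s.findIdx (fun c => pvStops.contains c))
      simp only [List.contains_eq_mem, decide_eq_false_iff_not] at this
      exact this (hsk.symm ▸ hchs)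
    have hnil : cuts = [] := by
      rw [hcuts]
      have h1 := hnos '\n' (by simp [pvStops])
      have h2 := hnos ';' (by simp [pvStops])
      have h3 := hnos '#' (by simp [pvStops])
      simp [pv_find_single, h1, h2, h3]
    rw [hnil]
    simp [PySem.List.minD, PySem.List.min?]
    omega

-- the two per-string results coincide
theorem pv_per_string (t : String) :
    PySem.Str.slice t none
      (some (Int.ofNat (match pvFindStop t.toList 0 with
        | some i => i
        | none => t.toList.length)))
    = PySem.Str.slice t none
      (some (PySem.List.minD
        (((['\n', ';', '#']).map (fun ch => PySem.Chars.find t.toList [ch])).filter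
          (fun p => p ≠ -1))
        (fun x => x) (PySem.Str.len t))) := by
  have hlen : PySem.Str.len t = (t.toList.length : Int) := by simp [PySem.Str.len_eq]
  rw [hlen, pv_cutB_eq, pv_cutA_eq]
  rfl

-- ===== VERDICT (by name: the statement is the Claim_ definition above) =====
theorem clean_generated_text_spec : Claim_equal_clean_generated_text := by
  intro generated_texts _
  unfold Spec_clean_generated_text clean_generated_text clean_generated_text_alt
  rw [PySem.List.foldl_append_singleton_eq_map, PySem.List.foldl_append_singleton_eq_map]
  exact List.map_congr_left (fun t _ => pv_per_string t)
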